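-- pv_equiv track=rewrite | github.com/qintianhaohao/EduData | examples/Math23k_Analysis_Report/Math23k_Analysis_Report.py | NuminProb
-- ===== SOURCE A (Python) =====
-- def NuminProb(text):
--     prob = str(text)
--     cnt = 0
--     flag = True
--
--     for w in prob:
--         if w.isdigit() or w == '.' or w == '%':
--             if flag:
--                 cnt += 1
--                 flag = False
--         else:
--             flag =True
--     return cnt
-- ===== SOURCE B (Python) =====
-- def NuminProb(text):
--     prob = str(text)
--     masked = ''.join(c if (c.isdigit() or c == '.' or c == '%') else ' ' for c in prob)
--     return len(masked.split())
-- ===== Notes on version B (the rewrite author's own statement) =====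
-- stated objective: idiomatic
-- what changed: Instead of A's mutable-flag state machine, B masks every non-numeric character to a space and lets str.split()'s whitespace tokenization count the maximal numeric runs.
import Mathlib
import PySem

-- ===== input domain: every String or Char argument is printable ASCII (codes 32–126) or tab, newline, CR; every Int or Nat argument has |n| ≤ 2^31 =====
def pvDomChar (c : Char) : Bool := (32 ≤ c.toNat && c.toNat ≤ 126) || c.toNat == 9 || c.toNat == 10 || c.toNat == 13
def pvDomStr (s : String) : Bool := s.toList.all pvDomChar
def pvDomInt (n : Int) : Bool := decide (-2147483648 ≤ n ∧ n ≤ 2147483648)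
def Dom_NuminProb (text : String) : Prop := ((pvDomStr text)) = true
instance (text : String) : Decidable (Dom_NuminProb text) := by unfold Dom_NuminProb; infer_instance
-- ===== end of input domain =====

-- B replaces A's mutable-flag state machine by a mask-then-tokenize pipeline:
-- every non-numeric character becomes a space and str.split() counts the words
-- (objective: idiomatic); same value on every input.

-- ===== PORT A =====
-- the character test (w.isdigit() or w == '.' or w == '%')
def pvIsNum (w : Char) : Bool := PySem.Chars.isdigit w || w == '.' || w == '%'

-- for w in prob: …  carrying (cnt, flag)
def NuminProbLoop (l : List Char) (cnt : Int) (flag : Bool) : Int :=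
  match l with
  | [] => cnt
  | w :: rest =>
    if pvIsNum w then
      if flag then NuminProbLoop rest (cnt + 1) false
      else NuminProbLoop rest cnt flag
    else NuminProbLoop rest cnt true

def NuminProb (text : String) : Int :=
  NuminProbLoop text.toList 0 true

-- ===== PORT B =====
-- masked = ''.join(c if is_num(c) else ' ' …); return len(masked.split())
def NuminProb_alt (text : String) : Int :=
  let masked := String.ofList (text.toList.map (fun c => if pvIsNum c then c else ' '))
  ((PySem.Str.split₀ masked).length : Int)

-- ===== PRECONDITION & SPEC =====
def Spec_NuminProb (text : String) (out : Int) : Prop := out = NuminProb_alt text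
instance (text : String) (out : Int) : Decidable (Spec_NuminProb text out) := by unfold Spec_NuminProb; infer_instance

-- ===== CLAIM (what is proved, stated in full; the proofs are below) =====
def Claim_equal_NuminProb : Prop := ∀ (text : String), Dom_NuminProb text → Spec_NuminProb text (NuminProb text)

-- ===== LEMMAS AND PROOFS =====

-- numeric characters are never whitespace
theorem isspace_of_isNum (c : Char) (h : pvIsNum c = true) :
    PySem.Chars.isspace c = false := by
  have hn : 37 ≤ c.toNat ∧ c.toNat ≤ 57 := by
    simp only [pvIsNum, PySem.Chars.isdigit, Bool.or_eq_true, decide_eq_true_eq,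
      Bool.and_eq_true, beq_iff_eq] at h
    rcases h with (⟨h1, h2⟩ | h) | h
    · exact ⟨le_trans (by decide) h1, h2⟩
    · subst h; decide
    · subst h; decide
  simp only [PySem.Chars.isspace]
  simp only [Bool.or_eq_false_iff, Bool.and_eq_false_iff, decide_eq_false_iff_not]
  omega

-- A's loop is its count from zero, shifted by the starting cnt
theorem NuminProbLoop_shift (l : List Char) (cnt : Int) (flag : Bool) :
    NuminProbLoop l cnt flag = cnt + NuminProbLoop l 0 flag := by
  induction l generalizing cnt flag with
  | nil => simp [NuminProbLoop]
  | cons w rest ih =>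
    simp only [NuminProbLoop]
    split_ifs with h1 h2
    · rw [ih (cnt + 1) false, ih (0 + 1) false]; ring
    · exact ih cnt flag
    · exact ih cnt true

-- the split₀ worker on the masked list counts exactly what A's loop counts
theorem split₀_go_masked (l : List Char) (cur : List Char) (acc : List (List Char)) :
    ((PySem.Chars.split₀.go (l.map (fun c => if pvIsNum c then c else ' ')) cur acc).length : Int)
      = acc.length + (if cur.isEmpty then 0 else 1) + NuminProbLoop l 0 cur.isEmpty := by
  induction l generalizing cur acc with
  | nil =>
    by_cases h : cur.isEmpty <;>
      simp [PySem.Chars.split₀.go, h, NuminProbLoop]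
  | cons w rest ih =>
    by_cases hw : pvIsNum w
    · have hsp : PySem.Chars.isspace w = false := isspace_of_isNum w hw
      simp only [List.map_cons, hw, if_true, PySem.Chars.split₀.go, hsp,
        Bool.false_eq_true, if_false]
      rw [ih (w :: cur) acc]
      cases hc : cur.isEmpty with
      | true =>
        simp only [NuminProbLoop, hw, if_true, List.isEmpty_cons]
        rw [NuminProbLoop_shift rest (0 + 1) false]; push_cast; ring
      | false =>
        simp [NuminProbLoop, hw, List.isEmpty_cons]
    · have hsp : PySem.Chars.isspace ' ' = true := by decide
      simp only [List.map_cons, hw, Bool.false_eq_true, if_false, PySem.Chars.split₀.go, hsp,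
        if_true]
      cases hc : cur.isEmpty with
      | true =>
        rw [if_pos rfl, ih [] acc]
        simp [NuminProbLoop, hw]
      | false =>
        rw [if_neg (by decide), ih [] (cur.reverse :: acc)]
        simp [NuminProbLoop, hw]

-- ===== VERDICT (by name: the statement is the Claim_ definition above) =====
theorem NuminProb_spec : Claim_equal_NuminProb := by
  intro text _
  unfold Spec_NuminProb NuminProb NuminProb_alt
  simp only [PySem.Str.split₀, List.length_map, String.toList_ofList, PySem.Chars.split₀]
  have h := split₀_go_masked text.toList [] []
  simp only [List.isEmpty_nil, if_true, List.length_nil] at h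
  rw [h]; simp
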